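-- pv_equiv track=rewrite | github.com/dexter2406/Monodepth2-TF2 | datasets/data_loader_velocitymlp.py | fix_length_complete
-- ===== SOURCE A (Python) =====
-- def fix_length_complete(data_lists):
--     """Make each list in data_list have 4 elements.
--     If not enough, duplicate; if exceeds, crop the first 4
--     NOTE: this only applies, when `self.fixed_length==4`
--     """
--     for i in range(len(data_lists)):
--         num_elem = len(data_lists[i])
--         if num_elem == 1:
--             data_lists[i] = data_lists[i] * 4
--         elif num_elem == 2:
--             data_lists[i] = data_lists[i] * 2
--         elif num_elem == 3:
--             data_lists[i].append(data_lists[i][0])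
--         elif num_elem > 4:
--             data_lists[i] = data_lists[i][:4]
--     return data_lists
-- ===== SOURCE B (Python) =====
-- def fix_length_complete(data_lists):
--     """Make each list in data_list have 4 elements via cyclic index fill.
--     Note: A mutates length-3 sublists in place; this equivalence is about values only."""
--     for i in range(len(data_lists)):
--         n = len(data_lists[i])
--         if n != 0 and n != 4:
--             data_lists[i] = [data_lists[i][k % n] for k in range(4)]
--     return data_lists
-- ===== Notes on version B (the rewrite author's own statement) =====
-- stated objective: simpler
-- what changed: Replaces the four per-length branches (duplicate x4, x2, append-first, crop) with one uniform cyclic-index fill sub[k % n] for k in range(4), skipping only empty and length-4 lists.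
import Mathlib
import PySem

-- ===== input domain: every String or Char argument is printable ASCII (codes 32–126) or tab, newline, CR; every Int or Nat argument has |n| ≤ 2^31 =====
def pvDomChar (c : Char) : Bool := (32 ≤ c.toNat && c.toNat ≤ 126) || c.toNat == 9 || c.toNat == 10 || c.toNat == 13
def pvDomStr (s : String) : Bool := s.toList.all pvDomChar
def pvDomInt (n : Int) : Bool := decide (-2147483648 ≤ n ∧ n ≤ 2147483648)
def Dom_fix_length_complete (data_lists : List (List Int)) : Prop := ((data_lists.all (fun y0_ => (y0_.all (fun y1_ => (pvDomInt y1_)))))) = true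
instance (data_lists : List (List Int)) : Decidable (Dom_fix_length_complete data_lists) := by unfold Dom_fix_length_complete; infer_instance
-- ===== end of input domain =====

-- B replaces A's four per-length branches with one cyclic-index fill; objective: simpler.
-- A mutates length-3 sublists in place (append); this equivalence is about the return value only.

-- ===== PORT A =====
-- A's loop rewrites each slot independently, so it is one helper applied per sublist.
def fixA_step (sub : List Int) : List Int :=
  let num_elem := sub.length
  if num_elem = 1 then sub ++ sub ++ sub ++ sub        -- data_lists[i] * 4
  else if num_elem = 2 then sub ++ sub                 -- data_lists[i] * 2
  else if num_elem = 3 then sub ++ [PySem.List.pyGetD sub 0 0]  -- append(data_lists[i][0])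
  else if num_elem > 4 then PySem.List.slice sub none (some 4)  -- data_lists[i][:4]
  else sub

def fix_length_complete (data_lists : List (List Int)) : List (List Int) :=
  data_lists.map fixA_step

-- ===== PORT B =====
def fixB_step (sub : List Int) : List Int :=
  let n : Int := sub.length
  if n ≠ 0 ∧ n ≠ 4 then
    (PySem.List.pyRange 0 4 1).map (fun k => PySem.List.pyGetD sub (PySem.Int.mod k n) 0)
  else sub

def fix_length_complete_alt (data_lists : List (List Int)) : List (List Int) :=
  data_lists.map fixB_step

-- ===== PRECONDITION & SPEC =====
def Spec_fix_length_complete (data_lists : List (List Int)) (out : List (List Int)) : Prop := out = fix_length_complete_alt data_lists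
instance (data_lists : List (List Int)) (out : List (List Int)) : Decidable (Spec_fix_length_complete data_lists out) := by unfold Spec_fix_length_complete; infer_instance

-- ===== CLAIM (what is proved, stated in full; the proofs are below) =====
def Claim_equal_fix_length_complete : Prop := ∀ (data_lists : List (List Int)), Dom_fix_length_complete data_lists → Spec_fix_length_complete data_lists (fix_length_complete data_lists)

-- ===== LEMMAS AND PROOFS =====

-- per-sublist agreement of the two strategies
theorem hr4 : PySem.List.pyRange 0 4 1 = [0, 1, 2, 3] := by decide

theorem fix_step_eq (sub : List Int) : fixA_step sub = fixB_step sub := by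
  match sub with
  | [] => decide
  | [a] =>
      simp only [fixA_step, fixB_step, hr4, List.map, List.length_cons, List.length_nil]
      norm_num
  | [a, b] =>
      simp only [fixA_step, fixB_step, hr4, List.map, List.length_cons, List.length_nil]
      norm_num
      rfl
  | [a, b, c] =>
      simp only [fixA_step, fixB_step, hr4, List.map, List.length_cons, List.length_nil]
      norm_num
      exact ⟨rfl, rfl⟩
  | [a, b, c, d] =>
      simp only [fixA_step, fixB_step, List.length_cons, List.length_nil]
      norm_num
  | a :: b :: c :: d :: e :: t =>
      -- length ≥ 5: A crops to the first 4; B's indices 0..3 are below n, so k % n = k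
      simp only [fixA_step, fixB_step, List.length_cons, hr4, List.map]
      push_cast
      have hmod : ∀ k : Int, 0 ≤ k → k < 5 →
          PySem.Int.mod k ((t.length : Int) + 1 + 1 + 1 + 1 + 1) = k := by
        intro k hk0 hk5
        rw [PySem.Int.mod_eq_emod_of_pos (by omega), Int.emod_eq_of_lt hk0 (by omega)]
      rw [if_pos (by omega : t.length + 1 + 1 + 1 + 1 + 1 > 4),
          if_pos (⟨by omega, by omega⟩ :
            ((t.length : Int) + 1 + 1 + 1 + 1 + 1) ≠ 0 ∧
            ((t.length : Int) + 1 + 1 + 1 + 1 + 1) ≠ 4),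
          hmod 0 (by omega) (by omega), hmod 1 (by omega) (by omega),
          hmod 2 (by omega) (by omega), hmod 3 (by omega) (by omega)]
      simp only [PySem.List.slice, PySem.List.clampIdx]
      norm_num
      rw [show min (Int.toNat 4) (t.length + 1 + 1 + 1 + 1 + 1) = 4 from by omega,
          show (1 : Int) = ((1 : Nat) : Int) from rfl,
          show (2 : Int) = ((2 : Nat) : Int) from rfl,
          show (3 : Int) = ((3 : Nat) : Int) from rfl]
      rw [PySem.List.pyGetD_natCast, PySem.List.pyGetD_natCast, PySem.List.pyGetD_natCast]
      rfl

-- ===== VERDICT (by name: the statement is the Claim_ definition above) =====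
theorem fix_length_complete_spec : Claim_equal_fix_length_complete := by
  intro data_lists _
  unfold Spec_fix_length_complete fix_length_complete fix_length_complete_alt
  exact List.map_congr_left (fun sub _ => fix_step_eq sub)
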